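-- pv_equiv track=rewrite | github.com/dongjiancheng77/pinyin_2022 | hmm.py | split_pinyin
-- ===== SOURCE A (Python) =====
-- def split_pinyin(pinyin, intact_pinyin_set, all_pinyin_set):
--     """
--     话说学了一周根本想不到动态规划是干这个的
--     """
--     # 用于保存动态规划答案的字典
--     intact_cut_pinyin_ans = {}
--     all_cut_pinyin_ans = {}
--
--     # 动态规划判断进行拼音划分
--     def cut_pinyin(str1: str, is_intact=False, is_break=True):
--         """
--         进行拼音划分, 返回拼音划分结果列表
--         str1: 无空格字符串
--         """
--         if is_intact:
--             pinyin_set = intact_pinyin_set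
--             ans_dict = intact_cut_pinyin_ans
--         else:
--             pinyin_set = all_pinyin_set
--             ans_dict = all_cut_pinyin_ans
--         if str1 in ans_dict:
--             return ans_dict[str1]
--         if is_break and '\'' in str1:
--             pinyins = str1.split('\'')
--             components = [cut_pinyin(p, is_intact, False) for p in pinyins]
--             an1 = components[0]
--             for i in range(1, len(components)):
--                 an1 = [p1 + p2 for p1 in an1 for p2 in components[i]]
--             return an1
--         # 动态规划生成
--         an2 = [] if str1 not in pinyin_set else [(str1,)]
--         for i in range(1, len(str1)):
--             if str1[:i] in pinyin_set:
--                 appendices = cut_pinyin(str1[i:], is_intact, is_break=False)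
--                 for appendix in appendices:
--                     an2.append((str1[:i],) + appendix)
--         ans_dict[str1] = an2
--         return an2
--
--     def cut_error(str2):
--         an3 = {}
--         for i in range(1, len(str2) - 1):
--             # 避免交换分词符
--             if str2[i - 1] == '\'' or str2[i] == '\'' or str2[i + 1] == '\'':
--                 continue
--             key = str2[:i] + str2[i + 1] + str2[i] + str2[i + 2:]
--             value = cut_pinyin(key, is_intact=True)
--             if value:
--                 an3[key] = value
--         an3['all'] = [p for t in an3.values() for p in t]
--         return an3
--
--     '''
--     纠错划分
--     模糊划分
--     '''
--     ans = {
--         'intact': cut_pinyin(pinyin, is_intact=True),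
--         'error_correction': cut_error(pinyin)['all'],
--         'fuzzy': cut_pinyin(pinyin, is_intact=False)
--     }
--
--     if ans['intact']:
--         return ans['intact']
--     if ans['error_correction']:
--         return ans['error_correction']
--     sm = 'b,p,m,f,d,t,n,l,g,k,h,z,c,s,zh,ch,sh,y,w'.split(',')
--     ym = 'r,j,q,x'.split(',')
--     an = ans['fuzzy']
--     anl = []
--     for x in an:
--         anl.append(list(x))
--     for x in anl:
--         for y in range(len(x)):
--             if x[y] in sm:
--                 x[y] += 'a'
--             if x[y] in ym:
--                 x[y] += 'i'
--
--     return anl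
-- ===== SOURCE B (Python) =====
-- def split_pinyin(pinyin, intact_pinyin_set, all_pinyin_set):
--     # Structural suffix-tails DP (no memo dicts), recursive split at the first apostrophe,
--     # staged error-correction pass (candidate keys -> ordered dedup -> flatten), and a
--     # lookup table for the sm/ym post-processing.
--
--     def tails(s, pset):
--         # [segmentations of s, of s[1:], ..., of s[len(s)-1:]]  (empty list for s == '')
--         if not s:
--             return []
--         tls = tails(s[1:], pset)
--         entry = [(s,)] if s in pset else []
--         p = ''
--         for ch, apps in zip(s, tls):
--             p += ch
--             if p in pset:
--                 entry += [(p,) + ap for ap in apps]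
--         return [entry] + tls
--
--     def seg_block(s, pset):
--         ts = tails(s, pset)
--         if ts:
--             return ts[0]
--         return [(s,)] if s in pset else []
--
--     def seg(s, pset):
--         if "'" in s:
--             i = s.index("'")
--             return [a + b for a in seg_block(s[:i], pset) for b in seg(s[i + 1:], pset)]
--         return seg_block(s, pset)
--
--     intact = seg(pinyin, intact_pinyin_set)
--     if intact:
--         return intact
--
--     candidates = []
--     for i in range(1, len(pinyin) - 1):
--         if "'" in (pinyin[i - 1], pinyin[i], pinyin[i + 1]):
--             continue
--         candidates.append(pinyin[:i] + pinyin[i + 1] + pinyin[i] + pinyin[i + 2:])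
--     err = []
--     for key in dict.fromkeys(candidates):
--         err.extend(seg(key, intact_pinyin_set))
--     if err:
--         return err
--
--     fix = {x: x + 'a' for x in 'b,p,m,f,d,t,n,l,g,k,h,z,c,s,zh,ch,sh,y,w'.split(',')}
--     fix.update({x: x + 'i' for x in 'r,j,q,x'.split(',')})
--     return [[fix.get(p, p) for p in t] for t in seg(pinyin, all_pinyin_set)]
-- ===== Notes on version B (the rewrite author's own statement) =====
-- stated objective: alternative
-- what changed: cut_pinyin's memoized top-down recursion over shared mutable answer dicts is replaced by a structural suffix-tails DP (each block's segmentations built by zipping the string with the segmentation lists of its suffixes) with a recursive split at the first apostrophe instead of split+fold cartesian product; cut_error's result dict becomes a staged pass (collect candidate keys, ordered dedup, flatten); the sm/ym if-pair becomes a single lookup table.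
import Mathlib
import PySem

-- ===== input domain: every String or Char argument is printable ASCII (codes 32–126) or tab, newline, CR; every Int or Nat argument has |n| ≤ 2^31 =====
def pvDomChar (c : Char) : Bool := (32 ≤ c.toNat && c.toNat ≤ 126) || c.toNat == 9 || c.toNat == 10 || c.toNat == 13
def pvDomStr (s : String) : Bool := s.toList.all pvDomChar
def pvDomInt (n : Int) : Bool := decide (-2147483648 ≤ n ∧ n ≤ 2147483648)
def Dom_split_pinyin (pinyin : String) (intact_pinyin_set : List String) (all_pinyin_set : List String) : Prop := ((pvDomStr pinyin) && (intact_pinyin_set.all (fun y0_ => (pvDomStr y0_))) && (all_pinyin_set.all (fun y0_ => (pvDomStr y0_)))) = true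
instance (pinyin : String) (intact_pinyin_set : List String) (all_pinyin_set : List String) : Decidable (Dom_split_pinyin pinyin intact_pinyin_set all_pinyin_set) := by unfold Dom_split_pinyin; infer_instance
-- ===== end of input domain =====

-- B replaces A's memoized top-down recursion (mutable answer dicts) by a structural suffix-tails DP
-- (each block's segmentations built by zipping the string with the segmentation lists of its suffixes),
-- a recursive split at the first apostrophe instead of split+fold product, a staged error pass
-- (candidate keys, ordered dedup, flatten) instead of a result dict, and a lookup table for the
-- sm/ym post-processing (objective: alternative).

-- A segmentation (a Python tuple of strings) is a List (List Char); a result is a list of segmentations.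
abbrev PvSegs : Type := List (List (List Char))
abbrev PvMemo : Type := PySem.Dict (List Char) PvSegs

-- ===== PORT A =====
-- cut_pinyin: fueled transliteration of A's memoized recursion (the fuel only makes the same
-- computation total; callers pass length+1, which the proofs show is never exhausted).
def pvCutA (pset : List (List Char)) (fuel : Nat) (s : List Char) (isBreak : Bool) (memo : PvMemo) :
    PvSegs × PvMemo :=
  match fuel with
  | 0 => ([], memo)
  | fuel + 1 =>
    match memo.get? s with
    | some v => (v, memo)                                   -- if str1 in ans_dict: return ans_dict[str1]
    | none =>
      if isBreak && s.contains '\'' then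
        let parts := PySem.Chars.splitOn s ['\'']           -- str1.split('\'')
        let cm := parts.foldl                               -- components = [cut_pinyin(p, ..., False) for p in pinyins]
          (fun (acc : List PvSegs × PvMemo) p =>
            let r := pvCutA pset fuel p false acc.2
            (acc.1 ++ [r.1], r.2)) ([], memo)
        match cm.1 with
        | [] => ([], cm.2)
        | c0 :: rest =>                                     -- an1 = [p1 + p2 for p1 in an1 for p2 in components[i]]
          (rest.foldl (fun an1 c => an1.flatMap fun p1 => c.map fun p2 => p1 ++ p2) c0, cm.2)
      else
        -- an2 = [] if str1 not in pinyin_set else [(str1,)]; for i in range(1, len(str1)): ...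
        let res := (List.range' 1 (s.length - 1)).foldl
          (fun (acc : PvSegs × PvMemo) i =>
            if pset.contains (s.take i) then
              let r := pvCutA pset fuel (s.drop i) false acc.2
              (acc.1 ++ r.1.map fun ap => s.take i :: ap, r.2)
            else acc)
          ((if pset.contains s then [[s]] else []), memo)
        (res.1, res.2.insert s res.1)                       -- ans_dict[str1] = an2
termination_by fuel

-- cut_error: an3 dict threaded with the shared intact memo; the returned value is an3['all'],
-- i.e. the flattening of an3.values() at the end of the loop (indexing s is always in range: 1 ≤ i ≤ len-2).
def pvCutErrA (pset : List (List Char)) (s : List Char) (memo : PvMemo) : PvSegs × PvMemo :=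
  let r := (List.range' 1 (s.length - 2)).foldl             -- for i in range(1, len(str2) - 1)
    (fun (acc : PySem.Dict (List Char) PvSegs × PvMemo) i =>
      if s.getD (i-1) ' ' == '\'' || s.getD i ' ' == '\'' || s.getD (i+1) ' ' == '\'' then acc
      else
        let key := s.take i ++ [s.getD (i+1) ' '] ++ [s.getD i ' '] ++ s.drop (i+2)
        let v := pvCutA pset (key.length + 1) key true acc.2
        (if v.1.isEmpty then acc.1 else acc.1.insert key v.1, v.2))
    (PySem.Dict.empty, memo)
  (r.1.values.flatten, r.2)

-- the sm/ym post-processing of one syllable: the Python index loop rewrites each position of x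
-- independently (the second `if` reads the value the first may just have produced), i.e. a per-element map.
def pvFixA (v : List Char) : List Char :=
  let sm : List (List Char) := [['b'],['p'],['m'],['f'],['d'],['t'],['n'],['l'],['g'],['k'],['h'],
                                ['z'],['c'],['s'],['z','h'],['c','h'],['s','h'],['y'],['w']]
  let ym : List (List Char) := [['r'],['j'],['q'],['x']]
  let v1 := if sm.contains v then v ++ ['a'] else v
  if ym.contains v1 then v1 ++ ['i'] else v1

def split_pinyin (pinyin : String) (intact_pinyin_set : List String) (all_pinyin_set : List String) :
    List (List String) :=
  let s := pinyin.toList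
  let psetI := intact_pinyin_set.map String.toList
  let psetA := all_pinyin_set.map String.toList
  let r1 := pvCutA psetI (s.length + 1) s true PySem.Dict.empty    -- ans['intact']
  let r2 := pvCutErrA psetI s r1.2                                 -- ans['error_correction'] (shared memo)
  let r3 := pvCutA psetA (s.length + 1) s true PySem.Dict.empty    -- ans['fuzzy']
  if !r1.1.isEmpty then r1.1.map (fun t => t.map String.ofList)
  else if !r2.1.isEmpty then r2.1.map (fun t => t.map String.ofList)
  else r3.1.map (fun t => t.map (fun v => String.ofList (pvFixA v)))

-- ===== PORT B =====
-- tails in Source B: [segs of s, segs of s[1:], ...]; each entry is built by zipping the block with the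
-- segmentation lists of its suffixes while growing the prefix p one character at a time.
def pvTails (pset : List (List Char)) : List Char → List PvSegs
  | [] => []
  | c :: rest =>
    let tls := pvTails pset rest
    let entry := ((c :: rest).zip tls).foldl
      (fun (st : PvSegs × List Char) (cp : Char × PvSegs) =>
        let p := st.2 ++ [cp.1]                             -- p += ch
        if pset.contains p then (st.1 ++ cp.2.map (fun ap => p :: ap), p) else (st.1, p))
      ((if pset.contains (c :: rest) then [[c :: rest]] else []), ([] : List Char))
    entry.1 :: tls

-- seg_block in Source B
def pvBlockB (pset : List (List Char)) (s : List Char) : PvSegs :=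
  match pvTails pset s with
  | e :: _ => e
  | [] => if pset.contains s then [[s]] else []

-- seg in Source B: recursive split at the FIRST apostrophe; s[:i] / s[i+1:] with i = s.index("'")
-- are ported as takeWhile / dropWhile+drop 1 (exact: i is the first index of the apostrophe).
def pvCutB (pset : List (List Char)) (s : List Char) : PvSegs :=
  if h : s.contains '\'' then
    let first := s.takeWhile (· ≠ '\'')
    let rest := (s.dropWhile (· ≠ '\'')).drop 1
    (pvBlockB pset first).flatMap (fun a => (pvCutB pset rest).map (fun b => a ++ b))
  else pvBlockB pset s
termination_by s.length
decreasing_by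
  have hq : '\'' ∈ s := by simpa using h
  have hne : s.dropWhile (· ≠ '\'') ≠ [] := by
    intro hnil
    have := (List.dropWhile_eq_nil_iff).1 hnil '\'' hq
    simp at this
  have hle := List.length_dropWhile_le (p := fun c => decide (c ≠ '\'')) (l := s)
  have hpos : 0 < (s.dropWhile (· ≠ '\'')).length := List.length_pos_of_ne_nil hne
  simp only [List.length_drop]
  omega

-- the candidate swap keys of the error-correction pass (comprehension in Source B)
def pvKeysB (s : List Char) : List (List Char) :=
  (List.range' 1 (s.length - 2)).filterMap (fun i =>
    if s.getD (i-1) ' ' == '\'' || s.getD i ' ' == '\'' || s.getD (i+1) ' ' == '\'' then none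
    else some (s.take i ++ [s.getD (i+1) ' '] ++ [s.getD i ' '] ++ s.drop (i+2)))

-- err in Source B: ordered dedup of the candidates (dict.fromkeys), then flatten the segmentations
def pvErrB (pset : List (List Char)) (s : List Char) : PvSegs :=
  (PySem.List.dedup (pvKeysB s)).foldl (fun acc k => acc ++ pvCutB pset k) []

-- fix in Source B, the dict comprehensions written out: sm syllables map to +'a', ym syllables to +'i'
def pvFixTable : List (List Char × List Char) :=
  [(['b'],['b','a']), (['p'],['p','a']), (['m'],['m','a']), (['f'],['f','a']), (['d'],['d','a']),
   (['t'],['t','a']), (['n'],['n','a']), (['l'],['l','a']), (['g'],['g','a']), (['k'],['k','a']),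
   (['h'],['h','a']), (['z'],['z','a']), (['c'],['c','a']), (['s'],['s','a']),
   (['z','h'],['z','h','a']), (['c','h'],['c','h','a']), (['s','h'],['s','h','a']),
   (['y'],['y','a']), (['w'],['w','a']),
   (['r'],['r','i']), (['j'],['j','i']), (['q'],['q','i']), (['x'],['x','i'])]

def pvFixB (v : List Char) : List Char := (pvFixTable.lookup v).getD v

def split_pinyin_alt (pinyin : String) (intact_pinyin_set : List String) (all_pinyin_set : List String) :
    List (List String) :=
  let s := pinyin.toList
  let psetI := intact_pinyin_set.map String.toList
  let psetA := all_pinyin_set.map String.toList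
  let intact := pvCutB psetI s
  if !intact.isEmpty then intact.map (fun t => t.map String.ofList)
  else
    let err := pvErrB psetI s
    if !err.isEmpty then err.map (fun t => t.map String.ofList)
    else (pvCutB psetA s).map (fun t => t.map (fun v => String.ofList (pvFixB v)))

-- ===== PRECONDITION & SPEC =====
def Spec_split_pinyin (pinyin : String) (intact_pinyin_set : List String) (all_pinyin_set : List String) (out : List (List String)) : Prop := out = split_pinyin_alt pinyin intact_pinyin_set all_pinyin_set
instance (pinyin : String) (intact_pinyin_set : List String) (all_pinyin_set : List String) (out : List (List String)) : Decidable (Spec_split_pinyin pinyin intact_pinyin_set all_pinyin_set out) := by unfold Spec_split_pinyin; infer_instance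

-- ===== CLAIM (what is proved, stated in full; the proofs are below) =====
def Claim_equal_split_pinyin : Prop := ∀ (pinyin : String) (intact_pinyin_set : List String) (all_pinyin_set : List String), Dom_split_pinyin pinyin intact_pinyin_set all_pinyin_set → Spec_split_pinyin pinyin intact_pinyin_set all_pinyin_set (split_pinyin pinyin intact_pinyin_set all_pinyin_set)

-- ===== LEMMAS AND PROOFS =====

-- The common mathematical value of both cuts of an apostrophe-free block: A's cut_pinyin in its
-- non-break branch and B's tails entries both compute pvCut.
def pvCut (pset : List (List Char)) (s : List Char) : PvSegs :=
  (if pset.contains s then [[s]] else []) ++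
  (List.range' 1 (s.length - 1)).attach.flatMap
    (fun i =>
      if pset.contains (s.take i.1) then (pvCut pset (s.drop i.1)).map (fun ap => s.take i.1 :: ap)
      else [])
termination_by s.length
decreasing_by
  have hmem := i.2
  rw [List.mem_range'] at hmem
  obtain ⟨k, hk, hik⟩ := hmem
  simp only [List.length_drop]
  omega

lemma pvCut_eq (pset : List (List Char)) (s : List Char) :
    pvCut pset s =
      (if pset.contains s then [[s]] else []) ++
      (List.range' 1 (s.length - 1)).flatMap
        (fun i =>
          if pset.contains (s.take i) then (pvCut pset (s.drop i)).map (fun ap => s.take i :: ap)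
          else []) := by
  conv_lhs => rw [pvCut]
  congr 1
  simp [List.flatMap_subtype]

-- the value of the full (break-aware) cut
def pvSpecCut (pset : List (List Char)) (s : List Char) : PvSegs :=
  if s.contains '\'' then
    match (PySem.Chars.splitOn s ['\'']).map (pvCut pset) with
    | [] => []
    | c0 :: rest => rest.foldl (fun an1 c => an1.flatMap fun p1 => c.map fun p2 => p1 ++ p2) c0
  else pvCut pset s

-- ---- Python str.split with a single-char separator, characterised structurally ----
def pvSplitChar (q : Char) : List Char → List (List Char)
  | [] => [[]]
  | c :: rest =>
    if c = q then [] :: pvSplitChar q rest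
    else
      match pvSplitChar q rest with
      | [] => [[c]]          -- unreachable: pvSplitChar never returns []
      | h :: t => (c :: h) :: t

lemma pvSplitChar_ne_nil (q : Char) (l : List Char) : pvSplitChar q l ≠ [] := by
  induction l with
  | nil => simp [pvSplitChar]
  | cons c rest ih =>
    simp only [pvSplitChar]
    split
    · simp
    · split <;> simp

lemma pvSplitChar_cons_exists (q : Char) (l : List Char) :
    ∃ h t, pvSplitChar q l = h :: t := by
  cases e : pvSplitChar q l with
  | nil => exact absurd e (pvSplitChar_ne_nil q l)
  | cons h t => exact ⟨h, t, rfl⟩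

lemma pvGo_eq (q : Char) :
    ∀ (fuel : Nat) (l cur : List Char) (acc : List (List Char)), l.length < fuel →
      PySem.Chars.splitOn.go [q] fuel l cur acc =
        acc.reverse ++ (match pvSplitChar q l with
          | [] => []
          | h :: t => (cur.reverse ++ h) :: t) := by
  intro fuel
  induction fuel with
  | zero => intro l cur acc h; omega
  | succ fuel ih =>
    intro l cur acc h
    cases l with
    | nil => simp [PySem.Chars.splitOn.go, pvSplitChar]
    | cons c rest =>
      obtain ⟨h0, t0, heq⟩ := pvSplitChar_cons_exists q rest
      have hlen : rest.length < fuel := by simp at h; omega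
      by_cases hc : c = q
      · simp only [PySem.Chars.splitOn.go]
        rw [if_pos (by simp [List.isPrefixOf, hc])]
        have hdrop : List.drop [q].length (c :: rest) = rest := by simp
        rw [hdrop, ih rest [] (cur.reverse :: acc) hlen]
        simp only [pvSplitChar, if_pos hc, heq]
        simp
      · simp only [PySem.Chars.splitOn.go]
        rw [if_neg (by simp [List.isPrefixOf]; intro hqc; exact hc hqc.symm)]
        rw [ih rest (c :: cur) acc hlen]
        simp only [pvSplitChar, if_neg hc, heq]
        simp

lemma splitOn_eq_pvSplitChar (q : Char) (s : List Char) :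
    PySem.Chars.splitOn s [q] = pvSplitChar q s := by
  obtain ⟨h0, t0, heq⟩ := pvSplitChar_cons_exists q s
  simp only [PySem.Chars.splitOn]
  rw [pvGo_eq q (s.length + 1) s [] [] (by omega)]
  simp [heq]

lemma pvSplitChar_not_mem (q : Char) (l p : List Char) (hp : p ∈ pvSplitChar q l) : q ∉ p := by
  induction l generalizing p with
  | nil => simp [pvSplitChar] at hp; simp [hp]
  | cons c rest ih =>
    obtain ⟨h0, t0, heq⟩ := pvSplitChar_cons_exists q rest
    by_cases hc : c = q
    · simp only [pvSplitChar, if_pos hc] at hp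
      rcases List.mem_cons.1 hp with rfl | hp'
      · simp
      · exact ih p hp'
    · simp only [pvSplitChar, if_neg hc, heq] at hp
      rcases List.mem_cons.1 hp with rfl | hp'
      · intro hq
        rcases List.mem_cons.1 hq with rfl | hq'
        · exact hc rfl
        · exact ih h0 (heq ▸ List.mem_cons_self) hq'
      · exact ih p (heq ▸ List.mem_cons_of_mem h0 hp')

lemma pvSplitChar_length_le (q : Char) (l p : List Char) (hp : p ∈ pvSplitChar q l) :
    p.length ≤ l.length := by
  induction l generalizing p with
  | nil => simp [pvSplitChar] at hp; simp [hp]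
  | cons c rest ih =>
    obtain ⟨h0, t0, heq⟩ := pvSplitChar_cons_exists q rest
    by_cases hc : c = q
    · simp only [pvSplitChar, if_pos hc] at hp
      rcases List.mem_cons.1 hp with rfl | hp'
      · simp
      · exact Nat.le_succ_of_le (ih p hp')
    · simp only [pvSplitChar, if_neg hc, heq] at hp
      rcases List.mem_cons.1 hp with rfl | hp'
      · have := ih h0 (heq ▸ List.mem_cons_self)
        simpa using Nat.succ_le_succ this
      · exact Nat.le_succ_of_le (ih p (heq ▸ List.mem_cons_of_mem h0 hp'))

lemma pvSplitChar_length_lt (q : Char) (l p : List Char) (hq : q ∈ l)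
    (hp : p ∈ pvSplitChar q l) : p.length < l.length := by
  induction l generalizing p with
  | nil => simp at hq
  | cons c rest ih =>
    obtain ⟨h0, t0, heq⟩ := pvSplitChar_cons_exists q rest
    by_cases hc : c = q
    · simp only [pvSplitChar, if_pos hc] at hp
      rcases List.mem_cons.1 hp with rfl | hp'
      · simp
      · have := pvSplitChar_length_le q rest p hp'
        simp only [List.length_cons]
        omega
    · have hq' : q ∈ rest := by
        rcases List.mem_cons.1 hq with rfl | h'
        · exact absurd rfl hc
        · exact h'
      simp only [pvSplitChar, if_neg hc, heq] at hp
      rcases List.mem_cons.1 hp with rfl | hp'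
      · have := ih h0 hq' (heq ▸ List.mem_cons_self)
        simpa using Nat.succ_lt_succ this
      · exact Nat.lt_succ_of_lt (ih p hq' (heq ▸ List.mem_cons_of_mem h0 hp'))

-- ---- the memo invariant: every cached entry is apostrophe-free and holds the pure value ----
def MemoOK (pset : List (List Char)) (m : PvMemo) : Prop :=
  ∀ k v, m.get? k = some v → k.contains '\'' = false ∧ v = pvCut pset k

lemma memoOK_empty (pset : List (List Char)) : MemoOK pset PySem.Dict.empty := by
  intro k v h
  simp [PySem.Dict.get?_empty] at h

-- ---- A's cut_pinyin computes pvSpecCut / pvCut and preserves the memo invariant ----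
lemma pvCutA_parts (pset : List (List Char)) (fuel : Nat)
    (IH : ∀ s' m', s'.length < fuel → MemoOK pset m' → s'.contains '\'' = false →
      (pvCutA pset fuel s' false m').1 = pvCut pset s' ∧
        MemoOK pset (pvCutA pset fuel s' false m').2) :
    ∀ (ps : List (List Char)) (acc0 : List PvSegs) (m : PvMemo), MemoOK pset m →
      (∀ p ∈ ps, p.length < fuel ∧ p.contains '\'' = false) →
      (ps.foldl (fun (acc : List PvSegs × PvMemo) p =>
          let r := pvCutA pset fuel p false acc.2
          (acc.1 ++ [r.1], r.2)) (acc0, m)).1 = acc0 ++ ps.map (pvCut pset) ∧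
      MemoOK pset (ps.foldl (fun (acc : List PvSegs × PvMemo) p =>
          let r := pvCutA pset fuel p false acc.2
          (acc.1 ++ [r.1], r.2)) (acc0, m)).2 := by
  intro ps
  induction ps with
  | nil => intro acc0 m hm _; simpa using hm
  | cons p ps ih =>
    intro acc0 m hm hps
    simp only [List.foldl_cons, List.map_cons]
    obtain ⟨h1, h2⟩ := IH p m (hps p (by simp)).1 hm (hps p (by simp)).2
    have hrec := ih (acc0 ++ [(pvCutA pset fuel p false m).1]) (pvCutA pset fuel p false m).2 h2
      (fun q hq => hps q (by simp [hq]))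
    dsimp only [] at hrec ⊢
    refine ⟨?_, hrec.2⟩
    rw [hrec.1, h1]
    simp

lemma pvCutA_dp (pset : List (List Char)) (fuel : Nat) (s : List Char)
    (hs : s.contains '\'' = false) (hfuel : s.length ≤ fuel)
    (IH : ∀ s' m', s'.length < fuel → MemoOK pset m' → s'.contains '\'' = false →
      (pvCutA pset fuel s' false m').1 = pvCut pset s' ∧
        MemoOK pset (pvCutA pset fuel s' false m').2) :
    ∀ (L : List Nat), (∀ i ∈ L, 1 ≤ i ∧ i < s.length) →
      ∀ (acc0 : PvSegs) (m : PvMemo), MemoOK pset m →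
      (L.foldl (fun (acc : PvSegs × PvMemo) i =>
          if pset.contains (s.take i) then
            let r := pvCutA pset fuel (s.drop i) false acc.2
            (acc.1 ++ r.1.map fun ap => s.take i :: ap, r.2)
          else acc) (acc0, m)).1
        = acc0 ++ L.flatMap (fun i =>
            if pset.contains (s.take i) then
              (pvCut pset (s.drop i)).map (fun ap => s.take i :: ap)
            else []) ∧
      MemoOK pset (L.foldl (fun (acc : PvSegs × PvMemo) i =>
          if pset.contains (s.take i) then
            let r := pvCutA pset fuel (s.drop i) false acc.2
            (acc.1 ++ r.1.map fun ap => s.take i :: ap, r.2)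
          else acc) (acc0, m)).2 := by
  intro L
  induction L with
  | nil => intro _ acc0 m hm; simpa using hm
  | cons i L ih =>
    intro hL acc0 m hm
    obtain ⟨hi1, hi2⟩ := hL i (by simp)
    simp only [List.foldl_cons, List.flatMap_cons]
    by_cases hc : pset.contains (s.take i) = true
    · have hdroplen : (s.drop i).length < fuel := by
        simp only [List.length_drop]; omega
      have hdropq : (s.drop i).contains '\'' = false := by
        have hq : '\'' ∉ s := by simpa using hs
        have : '\'' ∉ s.drop i := fun hmem => hq (List.mem_of_mem_drop hmem)
        simpa using this
      obtain ⟨h1, h2⟩ := IH (s.drop i) m hdroplen hm hdropq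
      have hrec := ih (fun j hj => hL j (by simp [hj]))
        (acc0 ++ (pvCutA pset fuel (s.drop i) false m).1.map fun ap => s.take i :: ap)
        (pvCutA pset fuel (s.drop i) false m).2 h2
      rw [if_pos hc]
      dsimp only [] at hrec ⊢
      rw [if_pos hc]
      refine ⟨?_, hrec.2⟩
      rw [hrec.1, h1]
      simp
    · rw [if_neg hc]
      have hrec := ih (fun j hj => hL j (by simp [hj])) acc0 m hm
      dsimp only [] at hrec ⊢
      rw [if_neg hc]
      refine ⟨?_, hrec.2⟩
      rw [hrec.1]
      simp

lemma pvCutA_main (pset : List (List Char)) :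
    ∀ fuel s isBreak memo, s.length < fuel → MemoOK pset memo →
      (isBreak = false → s.contains '\'' = false) →
      (pvCutA pset fuel s isBreak memo).1 = (if isBreak then pvSpecCut pset s else pvCut pset s) ∧
        MemoOK pset (pvCutA pset fuel s isBreak memo).2 := by
  intro fuel
  induction fuel with
  | zero => intro s isBreak memo h; omega
  | succ fuel ih =>
    intro s isBreak memo hlen hm hbr
    have IH : ∀ s' m', s'.length < fuel → MemoOK pset m' → s'.contains '\'' = false →
        (pvCutA pset fuel s' false m').1 = pvCut pset s' ∧
          MemoOK pset (pvCutA pset fuel s' false m').2 := by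
      intro s' m' h1 h2 h3
      have := ih s' false m' h1 h2 (fun _ => h3)
      simpa using this
    rw [pvCutA]
    cases hget : memo.get? s with
    | some v =>
      obtain ⟨hk, hv⟩ := hm s v hget
      dsimp only []
      refine ⟨?_, hm⟩
      cases isBreak
      · simpa using hv
      · unfold pvSpecCut
        have hnc : ¬ (s.contains '\'' = true) := by rw [hk]; exact Bool.false_ne_true
        rw [if_neg hnc]
        simpa using hv
    | none =>
      dsimp only []
      by_cases hbreak : (isBreak && s.contains '\'') = true
      · obtain ⟨hB, hC⟩ := Bool.and_eq_true_iff.1 hbreak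
        rw [if_pos hbreak]
        subst hB
        have hmemq : '\'' ∈ s := by simpa using hC
        have hpartsOK : ∀ p ∈ PySem.Chars.splitOn s ['\''], p.length < fuel ∧
            p.contains '\'' = false := by
          intro p hp
          rw [splitOn_eq_pvSplitChar] at hp
          refine ⟨?_, ?_⟩
          · have := pvSplitChar_length_lt '\'' s p hmemq hp
            omega
          · have := pvSplitChar_not_mem '\'' s p hp
            simpa using this
        obtain ⟨hf1, hf2⟩ := pvCutA_parts pset fuel IH (PySem.Chars.splitOn s ['\'']) [] memo
          hm hpartsOK
        dsimp only [] at hf1 hf2 ⊢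
        rw [if_pos rfl]
        unfold pvSpecCut
        rw [if_pos hC]
        rw [List.nil_append] at hf1
        rw [hf1]
        cases hps : (PySem.Chars.splitOn s ['\'']).map (pvCut pset) with
        | nil => exact ⟨rfl, hf2⟩
        | cons c0 rest => exact ⟨rfl, hf2⟩
      · rw [if_neg hbreak]
        have hC : s.contains '\'' = false := by
          cases isBreak
          · exact hbr rfl
          · revert hbreak
            cases h : s.contains '\'' <;> simp
        have hLmem : ∀ i ∈ List.range' 1 (s.length - 1), 1 ≤ i ∧ i < s.length := by
          intro i hi
          rw [List.mem_range'] at hi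
          obtain ⟨k, hk, hik⟩ := hi
          omega
        obtain ⟨hr1, hr2⟩ := pvCutA_dp pset fuel s hC (by omega) IH
          (List.range' 1 (s.length - 1)) hLmem
          (if pset.contains s then [[s]] else []) memo hm
        dsimp only [] at hr1 hr2 ⊢
        refine ⟨?_, ?_⟩
        · rw [hr1, ← pvCut_eq]
          cases isBreak
          · simp
          · unfold pvSpecCut
            have hnc : ¬ (s.contains '\'' = true) := by rw [hC]; exact Bool.false_ne_true
            rw [if_neg hnc]
            simp
        · intro k v hkv
          rw [PySem.Dict.get?_insert] at hkv
          by_cases hks : k = s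
          · subst hks
            rw [if_pos rfl] at hkv
            refine ⟨hC, ?_⟩
            have := Option.some.inj hkv
            rw [← this, hr1, ← pvCut_eq]
          · rw [if_neg hks] at hkv
            exact hr2 k v hkv

-- ---- B's suffix-tails DP computes pvCut ----
-- the per-suffix segmentation lists [pvCut s, pvCut s.tail, ...]
def pvSufSegs (pset : List (List Char)) : List Char → List PvSegs
  | [] => []
  | c :: r => pvCut pset (c :: r) :: pvSufSegs pset r

-- the value of the zipped entry fold, consumed pairwise
def pvRest2 (pset : List (List Char)) : List Char → List Char → List PvSegs → PvSegs
  | _, [], _ => []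
  | _, _ :: _, [] => []
  | p0, c :: r, apps :: L =>
    (if pset.contains (p0 ++ [c]) then apps.map (fun ap => (p0 ++ [c]) :: ap) else []) ++
      pvRest2 pset (p0 ++ [c]) r L

lemma pvEntryFold (pset : List (List Char)) :
    ∀ (t : List Char) (L : List PvSegs) (acc : PvSegs) (p0 : List Char),
      ((t.zip L).foldl
        (fun (st : PvSegs × List Char) (cp : Char × PvSegs) =>
          let p := st.2 ++ [cp.1]
          if pset.contains p then (st.1 ++ cp.2.map (fun ap => p :: ap), p) else (st.1, p))
        (acc, p0)).1 = acc ++ pvRest2 pset p0 t L := by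
  intro t
  induction t with
  | nil => intro L acc p0; simp [pvRest2]
  | cons c r ih =>
    intro L acc p0
    cases L with
    | nil => simp [pvRest2]
    | cons a L' =>
      simp only [List.zip_cons_cons, List.foldl_cons, pvRest2]
      by_cases hc : pset.contains (p0 ++ [c]) = true
      · rw [if_pos hc, if_pos hc, ih L' (acc ++ a.map (fun ap => (p0 ++ [c]) :: ap)) (p0 ++ [c])]
        simp
      · rw [if_neg hc, if_neg hc, ih L' acc (p0 ++ [c])]
        simp

lemma pvRest2_sufSegs (pset : List (List Char)) :
    ∀ (r : List Char) (c : Char) (p0 : List Char),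
      pvRest2 pset p0 (c :: r) (pvSufSegs pset r) =
        (List.range' 1 r.length).flatMap (fun i =>
          if pset.contains (p0 ++ (c :: r).take i) then
            (pvCut pset ((c :: r).drop i)).map (fun ap => (p0 ++ (c :: r).take i) :: ap)
          else []) := by
  intro r
  induction r with
  | nil => intro c p0; simp [pvSufSegs, pvRest2]
  | cons d r' ih =>
    intro c p0
    simp only [pvSufSegs, pvRest2]
    have hr : List.range' 1 (d :: r').length = 1 :: List.range' 2 r'.length := by
      simp [List.range'_succ]
    rw [hr, List.flatMap_cons, ih d (p0 ++ [c])]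
    have hreidx : (List.range' 2 r'.length).flatMap (fun i =>
        if pset.contains (p0 ++ (c :: d :: r').take i) then
          (pvCut pset ((c :: d :: r').drop i)).map (fun ap => (p0 ++ (c :: d :: r').take i) :: ap)
        else []) =
      (List.range' 1 r'.length).flatMap (fun i =>
        if pset.contains ((p0 ++ [c]) ++ (d :: r').take i) then
          (pvCut pset ((d :: r').drop i)).map (fun ap => ((p0 ++ [c]) ++ (d :: r').take i) :: ap)
        else []) := by
      rw [List.range'_eq_map_range (s := 2), List.range'_eq_map_range (s := 1)]
      rw [List.flatMap_map, List.flatMap_map]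
      apply List.flatMap_congr
      intro t _
      have e2 : 2 + t = (1 + t) + 1 := by omega
      rw [e2, List.take_succ_cons, List.drop_succ_cons, List.append_cons]
    rw [hreidx]
    congr 1

lemma pvTails_eq (pset : List (List Char)) (s : List Char) :
    pvTails pset s = pvSufSegs pset s := by
  induction s with
  | nil => simp [pvTails, pvSufSegs]
  | cons c r ih =>
    simp only [pvTails, pvSufSegs, ih]
    congr 1
    rw [pvEntryFold pset (c :: r) (pvSufSegs pset r) _ []]
    rw [pvRest2_sufSegs pset r c []]
    rw [pvCut_eq pset (c :: r)]
    simp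

lemma pvBlockB_eq (pset : List (List Char)) (s : List Char) :
    pvBlockB pset s = pvCut pset s := by
  unfold pvBlockB
  rw [pvTails_eq]
  cases s with
  | nil =>
    rw [pvCut_eq]
    simp [pvSufSegs]
  | cons c r => simp [pvSufSegs]

-- ---- B's recursive apostrophe split computes pvSpecCut ----
def pvProd (x y : PvSegs) : PvSegs := x.flatMap (fun a => y.map (fun b => a ++ b))

lemma pvProd_assoc (x y z : PvSegs) : pvProd (pvProd x y) z = pvProd x (pvProd y z) := by
  simp [pvProd, List.map_flatMap, List.flatMap_map, List.map_map, Function.comp_def,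
    List.flatMap_assoc, List.append_assoc]

lemma foldl_pvProd (cs : List PvSegs) : ∀ (a b : PvSegs),
    cs.foldl pvProd (pvProd a b) = pvProd a (cs.foldl pvProd b) := by
  induction cs with
  | nil => intro a b; rfl
  | cons c cs ih =>
    intro a b
    simp only [List.foldl_cons, pvProd_assoc, ih]

lemma pvSpecCut_foldl_eq (pset : List (List Char)) (s : List Char) :
    pvSpecCut pset s =
      if s.contains '\'' then
        match (PySem.Chars.splitOn s ['\'']).map (pvCut pset) with
        | [] => []
        | c0 :: rest => rest.foldl pvProd c0
      else pvCut pset s := rfl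

lemma pvParts_foldl (pset : List (List Char)) (s : List Char) (x : PvSegs) :
    ((pvSplitChar '\'' s).map (pvCut pset)).foldl pvProd x = pvProd x (pvSpecCut pset s) := by
  by_cases hq : '\'' ∈ s
  · obtain ⟨h0, t0, heq⟩ := pvSplitChar_cons_exists '\'' s
    rw [pvSpecCut_foldl_eq, if_pos (by simpa using hq), splitOn_eq_pvSplitChar, heq]
    simp only [List.map_cons, List.foldl_cons]
    exact foldl_pvProd _ x (pvCut pset h0)
  · have hsplit : pvSplitChar '\'' s = [s] := by
      induction s with
      | nil => rfl
      | cons c rest ihs =>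
        have hc : ¬ c = '\'' := fun h => hq (by simp [h])
        have hrest := ihs (fun h => hq (List.mem_cons_of_mem c h))
        simp [pvSplitChar, hc, hrest]
    rw [pvSpecCut_foldl_eq, if_neg (by simpa using hq), hsplit]
    simp only [List.map_cons, List.map_nil, List.foldl_cons, List.foldl_nil]

lemma pvSplitChar_first (q : Char) (s : List Char) (hq : q ∈ s) :
    pvSplitChar q s = s.takeWhile (· ≠ q) :: pvSplitChar q ((s.dropWhile (· ≠ q)).drop 1) := by
  induction s with
  | nil => simp at hq
  | cons c rest ih =>
    by_cases hc : c = q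
    · subst hc
      simp [pvSplitChar]
    · have hq' : q ∈ rest := by
        rcases List.mem_cons.1 hq with h | h
        · exact absurd h.symm hc
        · exact h
      obtain ⟨h0, t0, heq⟩ := pvSplitChar_cons_exists q rest
      rw [ih hq'] at heq
      simp only [pvSplitChar, if_neg hc, ih hq']
      simp [hc]

lemma pvCutB_eq (pset : List (List Char)) (s : List Char) :
    pvCutB pset s = pvSpecCut pset s := by
  suffices H : ∀ (n : Nat) (s : List Char), s.length ≤ n → pvCutB pset s = pvSpecCut pset s from
    H s.length s le_rfl
  intro n
  induction n with
  | zero =>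
    intro s hs
    have : s = [] := List.length_eq_zero_iff.1 (by omega)
    subst this
    rw [pvCutB, pvSpecCut]
    simp [pvBlockB_eq]
  | succ n ihn =>
    intro s hs
    rw [pvCutB]
    by_cases hq : s.contains '\'' = true
    · rw [dif_pos hq]
      show (pvBlockB pset (s.takeWhile (· ≠ '\''))).flatMap
          (fun a => (pvCutB pset ((s.dropWhile (· ≠ '\'')).drop 1)).map (fun b => a ++ b)) =
        pvSpecCut pset s
      have hmem : '\'' ∈ s := by simpa using hq
      have hne : s.dropWhile (· ≠ '\'') ≠ [] := by
        intro hnil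
        have := (List.dropWhile_eq_nil_iff).1 hnil '\'' hmem
        simp at this
      have hlenrest : ((s.dropWhile (· ≠ '\'')).drop 1).length ≤ n := by
        have hle := List.length_dropWhile_le (p := fun c => decide (c ≠ '\'')) (l := s)
        have hpos : 0 < (s.dropWhile (· ≠ '\'')).length := List.length_pos_of_ne_nil hne
        simp only [List.length_drop]
        omega
      rw [ihn _ hlenrest, pvBlockB_eq]
      rw [pvSpecCut_foldl_eq pset s, if_pos hq, splitOn_eq_pvSplitChar,
        pvSplitChar_first '\'' s hmem]
      simp only [List.map_cons, List.foldl_cons]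
      rw [← splitOn_eq_pvSplitChar]
      rw [show PySem.Chars.splitOn ((s.dropWhile (· ≠ '\'')).drop 1) ['\''] =
            pvSplitChar '\'' ((s.dropWhile (· ≠ '\'')).drop 1) from
          splitOn_eq_pvSplitChar _ _] at *
      rw [pvParts_foldl]
      rfl
    · rw [dif_neg hq, pvBlockB_eq, pvSpecCut]
      rw [if_neg hq]

-- ---- the two error-correction passes agree ----
-- the common value: process the candidate keys in order, skipping keys already seen
def pvErrSpec (pset : List (List Char)) : (List Char → Bool) → List (List Char) → PvSegs
  | _, [] => []
  | seen, k :: ks =>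
    if seen k then pvErrSpec pset seen ks
    else pvSpecCut pset k ++ pvErrSpec pset (fun x => seen x || x == k) ks

lemma pvErrSpec_addEmpty (pset : List (List Char)) (k : List Char)
    (h : pvSpecCut pset k = []) :
    ∀ (ks : List (List Char)) (seen : List Char → Bool),
      pvErrSpec pset (fun x => seen x || x == k) ks = pvErrSpec pset seen ks := by
  intro ks
  induction ks with
  | nil => intro seen; rfl
  | cons k' ks ih =>
    intro seen
    simp only [pvErrSpec]
    by_cases h1 : seen k' = true
    · rw [if_pos (by simp [h1]), if_pos h1]
      exact ih seen
    · by_cases h2 : (k' == k) = true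
      · have hkk : k' = k := by simpa using h2
        subst hkk
        rw [if_pos (by simp [h2]), if_neg (by simp [h1]), h]
        simp
      · rw [if_neg (by simp [h1, h2]), if_neg (by simp [h1])]
        have hfun : (fun x => (seen x || x == k) || x == k') =
            (fun x => (seen x || x == k') || x == k) := by
          funext x
          cases seen x <;> cases hx1 : x == k <;> cases hx2 : x == k' <;> simp [hx1, hx2]
        rw [hfun, ih (fun x => seen x || x == k')]

-- a dict insert that re-stores the value a key already holds leaves the dict unchanged
lemma pvInsertSame (d : PySem.Dict (List Char) PvSegs) (k : List Char) (v : PvSegs)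
    (hnd : d.keys.Nodup) (h : d.get? k = some v) : d.insert k v = d := by
  apply PySem.Dict.ext
  have hcont : d.contains k = true := by
    rw [PySem.Dict.contains_eq_isSome_get?, h]
    rfl
  rw [PySem.Dict.items_insert_of_contains d v hcont]
  conv_rhs => rw [← List.map_id d.items]
  apply List.map_congr_left
  intro p hp
  by_cases hpk : p.1 = k
  · have hget : d.get? p.1 = some p.2 := PySem.Dict.get?_of_mem_items d (by simpa using hp) hnd
    rw [hpk] at hget
    have hv : p.2 = v := by
      have := hget.symm.trans h
      exact (Option.some.inj this).symm ▸ rfl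
    simp only [id]
    rw [if_pos (by simp [hpk])]
    rw [← hpk, ← hv]
  · rw [if_neg (by simp [hpk])]
    rfl

def pvEntriesOK (pset : List (List Char)) (d : PySem.Dict (List Char) PvSegs) : Prop :=
  ∀ k v, d.get? k = some v → v = pvSpecCut pset k ∧ v ≠ []

-- A's cut_error loop, folded over the candidate keys, flattens to pvErrSpec
lemma pvErrLoopA (pset : List (List Char)) :
    ∀ (K : List (List Char)) (d : PySem.Dict (List Char) PvSegs) (m : PvMemo),
      MemoOK pset m → d.keys.Nodup → pvEntriesOK pset d →
      (K.foldl (fun (acc : PySem.Dict (List Char) PvSegs × PvMemo) key =>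
          let v := pvCutA pset (key.length + 1) key true acc.2
          (if v.1.isEmpty then acc.1 else acc.1.insert key v.1, v.2)) (d, m)).1.values.flatten
        = d.values.flatten ++ pvErrSpec pset (fun x => d.keys.contains x) K := by
  intro K
  induction K with
  | nil => intro d m _ _ _; simp [pvErrSpec]
  | cons k K ih =>
    intro d m hm hnd hE
    simp only [List.foldl_cons, pvErrSpec]
    have hmain := pvCutA_main pset (k.length + 1) k true m (by omega) hm (by simp)
    have hv1 : (pvCutA pset (k.length + 1) k true m).1 = pvSpecCut pset k := by
      simpa using hmain.1
    have hm2 := hmain.2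
    by_cases hseen : d.keys.contains k = true
    · rw [if_pos hseen]
      have hkeys : k ∈ d.keys := by simpa using hseen
      obtain ⟨w, hw⟩ : ∃ w, d.get? k = some w := by
        cases hq : d.get? k with
        | none => exact absurd ((PySem.Dict.get?_eq_none_iff_not_mem_keys d k).1 hq) (by simp [hkeys])
        | some w => exact ⟨w, rfl⟩
      obtain ⟨hwspec, hwne⟩ := hE k w hw
      have hvw : (pvCutA pset (k.length + 1) k true m).1 = w := by rw [hv1, hwspec]
      have hne : (pvCutA pset (k.length + 1) k true m).1.isEmpty = false := by
        rw [hvw]; simpa using hwne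
      rw [if_neg (by rw [hne]; exact Bool.false_ne_true)]
      rw [hvw, pvInsertSame d k w hnd hw]
      exact ih d _ hm2 hnd hE
    · rw [if_neg hseen]
      have hnk : k ∉ d.keys := by simpa using hseen
      have hcont : d.contains k = false := by
        cases hc : d.contains k
        · rfl
        · exact absurd ((PySem.Dict.contains_iff_mem_keys d k).1 hc) hnk
      by_cases hemp : (pvCutA pset (k.length + 1) k true m).1.isEmpty = true
      · have hsegnil : pvSpecCut pset k = [] := by
          rw [← hv1]; simpa using hemp
        rw [if_pos hemp]
        rw [hsegnil, List.nil_append, pvErrSpec_addEmpty pset k hsegnil]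
        exact ih d _ hm2 hnd hE
      · rw [if_neg hemp]
        have hvne : (pvCutA pset (k.length + 1) k true m).1 ≠ [] := by simpa using hemp
        have hkeys' := PySem.Dict.keys_insert_of_not_contains d
          (pvCutA pset (k.length + 1) k true m).1 hcont
        have hitems' := PySem.Dict.items_insert_of_not_contains d
          (pvCutA pset (k.length + 1) k true m).1 hcont
        have hnd' : (d.insert k (pvCutA pset (k.length + 1) k true m).1).keys.Nodup := by
          rw [hkeys']
          have hdisj : ∀ a ∈ d.keys, ¬ a = k := fun a ha hak => hnk (hak ▸ ha)
          simp [List.nodup_append, hnd]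
          exact hdisj
        have hE' : pvEntriesOK pset (d.insert k (pvCutA pset (k.length + 1) k true m).1) := by
          intro k' v' hkv
          rw [PySem.Dict.get?_insert] at hkv
          by_cases hk' : k' = k
          · rw [if_pos hk'] at hkv
            have := Option.some.inj hkv
            subst hk'
            rw [← this, hv1]
            exact ⟨rfl, by rw [hv1] at hvne; exact hvne⟩
          · rw [if_neg hk'] at hkv
            exact hE k' v' hkv
        rw [ih _ _ hm2 hnd' hE']
        have hflat : (d.insert k (pvCutA pset (k.length + 1) k true m).1).values.flatten =
            d.values.flatten ++ pvSpecCut pset k := by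
          simp only [PySem.Dict.values, hitems', List.map_append, List.flatten_append]
          rw [hv1]
          simp
        have hfun : (fun x => (d.insert k (pvCutA pset (k.length + 1) k true m).1).keys.contains x)
            = (fun x => d.keys.contains x || x == k) := by
          funext x
          rw [hkeys', List.contains_append]
          simp [Bool.beq_eq_decide_eq]
        rw [hflat, hfun]
        simp [List.append_assoc]

-- the ordered-dedup flatten of B equals pvErrSpec
lemma pvDedupFlatMap (pset : List (List Char)) :
    ∀ (K s0 : List (List Char)),
      (K.foldl PySem.Set.add s0).flatMap (pvSpecCut pset) =
        s0.flatMap (pvSpecCut pset) ++ pvErrSpec pset (fun x => s0.contains x) K := by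
  intro K
  induction K with
  | nil => intro s0; simp [pvErrSpec]
  | cons k K ih =>
    intro s0
    simp only [List.foldl_cons, pvErrSpec, PySem.Set.add]
    by_cases hc : PySem.Set.contains s0 k = true
    · rw [if_pos hc]
      have hc' : s0.contains k = true := hc
      rw [if_pos hc']
      exact ih s0
    · rw [if_neg hc]
      have hc' : s0.contains k = false := by
        cases h : s0.contains k
        · rfl
        · exact absurd (h : PySem.Set.contains s0 k = true) hc
      rw [if_neg (by rw [hc']; exact Bool.false_ne_true)]
      rw [ih (s0 ++ [k])]
      have hfun : (fun x => (s0 ++ [k]).contains x) = (fun x => s0.contains x || x == k) := by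
        funext x
        rw [List.contains_append]
        simp [Bool.beq_eq_decide_eq]
      rw [hfun]
      simp [List.append_assoc]

lemma pvGuardFoldFM (pset : List (List Char)) (s : List Char) :
    ∀ (L : List Nat) (st : PySem.Dict (List Char) PvSegs × PvMemo),
      L.foldl (fun (acc : PySem.Dict (List Char) PvSegs × PvMemo) i =>
          if s.getD (i-1) ' ' == '\'' || s.getD i ' ' == '\'' || s.getD (i+1) ' ' == '\'' then acc
          else
            let key := s.take i ++ [s.getD (i+1) ' '] ++ [s.getD i ' '] ++ s.drop (i+2)
            let v := pvCutA pset (key.length + 1) key true acc.2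
            (if v.1.isEmpty then acc.1 else acc.1.insert key v.1, v.2)) st
        = (L.filterMap (fun i =>
            if s.getD (i-1) ' ' == '\'' || s.getD i ' ' == '\'' || s.getD (i+1) ' ' == '\'' then none
            else some (s.take i ++ [s.getD (i+1) ' '] ++ [s.getD i ' '] ++ s.drop (i+2)))).foldl
            (fun (acc : PySem.Dict (List Char) PvSegs × PvMemo) key =>
              let v := pvCutA pset (key.length + 1) key true acc.2
              (if v.1.isEmpty then acc.1 else acc.1.insert key v.1, v.2)) st := by
  intro L
  induction L with
  | nil => intro st; rfl
  | cons i L ih =>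
    intro st
    by_cases hg : (s.getD (i-1) ' ' == '\'' || s.getD i ' ' == '\'' || s.getD (i+1) ' ' == '\'') = true
    · rw [List.foldl_cons, if_pos hg, List.filterMap_cons_none (by rw [if_pos hg]), ih st]
    · rw [List.foldl_cons, if_neg hg,
        List.filterMap_cons_some (by rw [if_neg hg]), List.foldl_cons, ih]

lemma pvCutErrA_eq (pset : List (List Char)) (s : List Char) (memo : PvMemo)
    (hm : MemoOK pset memo) : (pvCutErrA pset s memo).1 = pvErrB pset s := by
  unfold pvCutErrA pvErrB pvKeysB
  dsimp only []
  rw [pvGuardFoldFM pset s (List.range' 1 (s.length - 2)) (PySem.Dict.empty, memo)]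
  rw [pvErrLoopA pset _ PySem.Dict.empty memo hm (by simp [PySem.Dict.keys, PySem.Dict.empty])
    (fun k v h => absurd h (by simp [PySem.Dict.get?_empty]))]
  rw [PySem.List.foldl_append_eq_flatMap]
  rw [List.flatMap_congr (fun k _ => pvCutB_eq pset k)]
  rw [PySem.List.dedup_eq_ofList]
  unfold PySem.Set.ofList
  rw [pvDedupFlatMap pset _ PySem.Set.empty]
  simp [PySem.Dict.values, PySem.Dict.keys, PySem.Dict.empty]

-- ---- the two post-processing passes agree ----
lemma pvLookupNone (a : List Char) :
    ∀ (l : List (List Char × List Char)), (∀ p ∈ l, (a == p.1) = false) → l.lookup a = none := by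
  intro l
  induction l with
  | nil => intro _; rfl
  | cons p l ih =>
    intro h
    simp only [List.lookup]
    rw [h p (by simp)]
    exact ih (fun q hq => h q (by simp [hq]))

lemma pvFix_eq (v : List Char) : pvFixB v = pvFixA v := by
  unfold pvFixA
  by_cases h1 : v ∈ ([['b'],['p'],['m'],['f'],['d'],['t'],['n'],['l'],['g'],['k'],['h'],
      ['z'],['c'],['s'],['z','h'],['c','h'],['s','h'],['y'],['w']] : List (List Char))
  · fin_cases h1 <;> rfl
  · by_cases h2 : v ∈ ([['r'],['j'],['q'],['x']] : List (List Char))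
    · fin_cases h2 <;> rfl
    · have hc1 : ([['b'],['p'],['m'],['f'],['d'],['t'],['n'],['l'],['g'],['k'],['h'],
          ['z'],['c'],['s'],['z','h'],['c','h'],['s','h'],['y'],['w']] : List (List Char)).contains v = false := by
        simpa using h1
      have hc2 : ([['r'],['j'],['q'],['x']] : List (List Char)).contains v = false := by
        simpa using h2
      simp only [hc1, hc2, Bool.false_eq_true, if_false]
      unfold pvFixB
      rw [pvLookupNone v pvFixTable ?_]
      · rfl
      · intro p hp
        have hv : v ≠ p.1 := by
          intro hEq
          rw [hEq] at h1 h2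
          fin_cases hp <;> simp_all
        simp [hv]

-- ===== VERDICT (by name: the statement is the Claim_ definition above) =====
theorem split_pinyin_spec : Claim_equal_split_pinyin := by
  intro pinyin intact_pinyin_set all_pinyin_set _dom
  unfold Spec_split_pinyin split_pinyin split_pinyin_alt
  dsimp only []
  have hI := pvCutA_main (intact_pinyin_set.map String.toList) (pinyin.toList.length + 1)
    pinyin.toList true PySem.Dict.empty (by omega) (memoOK_empty _) (by simp)
  have hI1 : (pvCutA (intact_pinyin_set.map String.toList) (pinyin.toList.length + 1)
      pinyin.toList true PySem.Dict.empty).1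
      = pvSpecCut (intact_pinyin_set.map String.toList) pinyin.toList := by simpa using hI.1
  have hErr := pvCutErrA_eq (intact_pinyin_set.map String.toList) pinyin.toList _ hI.2
  have hA := pvCutA_main (all_pinyin_set.map String.toList) (pinyin.toList.length + 1)
    pinyin.toList true PySem.Dict.empty (by omega) (memoOK_empty _) (by simp)
  have hA1 : (pvCutA (all_pinyin_set.map String.toList) (pinyin.toList.length + 1)
      pinyin.toList true PySem.Dict.empty).1
      = pvSpecCut (all_pinyin_set.map String.toList) pinyin.toList := by simpa using hA.1
  rw [hI1, hErr, hA1]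
  simp only [pvCutB_eq, pvFix_eq]
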